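-- pv_equiv track=rewrite | github.com/MeHelmy/princess | scripts/update_sv_hp_ps.py | categorize_ps
-- ===== SOURCE A (Python) =====
-- def categorize_ps(myvalues):
--     myvalues = [i for i in myvalues if i is not None] # remove None
--     ps_dict = {}
--     for i in myvalues:
--         hp = int(i[0])
--         ps = i[1]
--         if ps in ps_dict:
--             if hp == 1:
--                 if ps_dict[ps] < 0:
--                     ps_dict[ps] = ps_dict[ps] - 1
--                 else: #conflict
--                     ps_dict[ps] = 0
--
--             else: # means that it is haplotype 2 hp=2
--                 if ps_dict[ps] > 0:
--                     ps_dict[ps] = ps_dict[ps] + 1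
--                 else: #conflict
--                     ps_dict[ps] = 0
--         else:
--             if hp == 1:
--                 ps_dict[ps] = -1
--             else:
--                 ps_dict[ps] = 1
--     return ps_dict
-- ===== SOURCE B (Python) =====
-- def _classify(c1, c2):
--     return -c1 if c2 == 0 else (c2 if c1 == 0 else 0)
--
-- def categorize_ps(myvalues):
--     counts = {}
--     for i in myvalues:
--         if i is None:
--             continue
--         hp1 = int(i[0]) == 1
--         ps = i[1]
--         c1, c2 = counts.get(ps, (0, 0))
--         counts[ps] = (c1 + 1, c2) if hp1 else (c1, c2 + 1)
--     return {ps: _classify(c1, c2) for ps, (c1, c2) in counts.items()}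
-- ===== Notes on version B (the rewrite author's own statement) =====
-- stated objective: alternative
-- what changed: Replaces A's order-dependent sticky accumulator (negative/positive/0-conflict updates per vote) with a two-pass count-then-classify: one pass keeps per-phase-set (hp1, other) vote counters, a second pass emits -hp1count, +othercount, or 0 by a closed-form classification.
import Mathlib
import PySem

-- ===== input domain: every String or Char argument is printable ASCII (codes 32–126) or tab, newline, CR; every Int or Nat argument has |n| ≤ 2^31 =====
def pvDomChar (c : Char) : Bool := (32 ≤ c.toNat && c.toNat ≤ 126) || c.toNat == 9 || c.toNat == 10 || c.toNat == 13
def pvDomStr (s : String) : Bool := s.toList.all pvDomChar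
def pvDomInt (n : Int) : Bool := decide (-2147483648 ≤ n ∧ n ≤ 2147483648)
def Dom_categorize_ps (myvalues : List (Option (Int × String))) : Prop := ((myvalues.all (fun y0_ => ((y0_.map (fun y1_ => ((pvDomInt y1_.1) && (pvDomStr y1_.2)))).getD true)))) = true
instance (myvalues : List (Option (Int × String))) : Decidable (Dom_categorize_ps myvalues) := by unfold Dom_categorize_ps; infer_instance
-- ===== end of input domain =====

-- B replaces A's order-dependent sticky-accumulator vote merging with a two-pass
-- count-then-classify formulation (objective: alternative; same cost).

-- ===== PORT A =====
-- one loop step of A's for-loop (dict lookup ps_dict[ps] is getD under the contains guard)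
def pvStepA (d : PySem.Dict String Int) (i : Int × String) : PySem.Dict String Int :=
  let hp := i.1          -- int(i[0]) on an int is the identity
  let ps := i.2
  if d.contains ps then
    if hp == 1 then
      if d.getD ps 0 < 0 then d.insert ps (d.getD ps 0 - 1) else d.insert ps 0
    else
      if d.getD ps 0 > 0 then d.insert ps (d.getD ps 0 + 1) else d.insert ps 0
  else
    if hp == 1 then d.insert ps (-1) else d.insert ps 1

def categorize_ps (myvalues : List (Option (Int × String))) : List (String × Int) :=
  -- myvalues.filterMap id is [i for i in myvalues if i is not None]
  ((myvalues.filterMap id).foldl pvStepA PySem.Dict.empty).items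

-- ===== PORT B =====
def pvClassify (c : Int × Int) : Int :=
  if c.2 == 0 then -c.1 else if c.1 == 0 then c.2 else 0

def pvStepB (d : PySem.Dict String (Int × Int)) (i : Option (Int × String)) :
    PySem.Dict String (Int × Int) :=
  match i with
  | none => d
  | some p =>
    let hp1 := p.1 == 1
    let c := d.getD p.2 (0, 0)
    d.insert p.2 (if hp1 then (c.1 + 1, c.2) else (c.1, c.2 + 1))

def categorize_ps_alt (myvalues : List (Option (Int × String))) : List (String × Int) :=
  (myvalues.foldl pvStepB PySem.Dict.empty).items.map (fun kv => (kv.1, pvClassify kv.2))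

-- ===== PRECONDITION & SPEC =====
def Spec_categorize_ps (myvalues : List (Option (Int × String))) (out : List (String × Int)) : Prop := out = categorize_ps_alt myvalues
instance (myvalues : List (Option (Int × String))) (out : List (String × Int)) : Decidable (Spec_categorize_ps myvalues out) := by unfold Spec_categorize_ps; infer_instance

-- ===== CLAIM (what is proved, stated in full; the proofs are below) =====
def Claim_equal_categorize_ps : Prop := ∀ (myvalues : List (Option (Int × String))), Dom_categorize_ps myvalues → Spec_categorize_ps myvalues (categorize_ps myvalues)

-- ===== LEMMAS AND PROOFS =====

-- the pairing of a counter entry with its classified vote value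
def pvF (p : String × (Int × Int)) : String × Int := (p.1, pvClassify p.2)

-- all counters stored in B's dict are componentwise nonnegative and not (0,0)
def pvGood (d : PySem.Dict String (Int × Int)) : Prop :=
  ∀ k v, d.get? k = some v → 0 ≤ v.1 ∧ 0 ≤ v.2 ∧ v ≠ (0, 0)

theorem pvGood_empty : pvGood PySem.Dict.empty := by
  intro k v h; simp [PySem.Dict.get?_empty] at h

theorem pv_get?_map (l : List (String × (Int × Int))) (k : String) :
    (PySem.Dict.mk (l.map pvF)).get? k = ((PySem.Dict.mk l).get? k).map pvClassify := by
  induction l with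
  | nil => rfl
  | cons p rest ih =>
    cases p with
    | mk a b =>
      simp only [List.map_cons, pvF, PySem.Dict.get?_mk_cons]
      by_cases h : a == k <;> simp [h, ih]

theorem pv_insert_map (l : List (String × (Int × Int))) (k : String) (c : Int × Int) :
    (PySem.Dict.mk (l.map pvF)).insert k (pvClassify c)
      = PySem.Dict.mk ((((PySem.Dict.mk l).insert k c).items).map pvF) := by
  have hc : (PySem.Dict.mk (l.map pvF)).contains k = (PySem.Dict.mk l).contains k := by
    rw [PySem.Dict.contains_eq_isSome_get?, PySem.Dict.contains_eq_isSome_get?, pv_get?_map]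
    cases (PySem.Dict.mk l).get? k <;> rfl
  apply PySem.Dict.ext
  by_cases h : (PySem.Dict.mk l).contains k = true
  · rw [PySem.Dict.items_insert_of_contains _ _ h,
      PySem.Dict.items_insert_of_contains _ _ (hc.trans h)]
    show (l.map pvF).map _ = (l.map _).map pvF
    rw [List.map_map, List.map_map]
    apply List.map_congr_left
    intro p _
    cases p with
    | mk a b => by_cases hak : a = k <;> simp [pvF, hak]
  · rw [PySem.Dict.items_insert_of_not_contains _ _ (Bool.of_not_eq_true h),
      PySem.Dict.items_insert_of_not_contains _ _ (hc.trans (Bool.of_not_eq_true h))]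
    show (l.map pvF) ++ _ = (l ++ [(k, c)]).map pvF
    simp [pvF]

-- one step of A simulates one step of B through pvClassify
theorem pv_step (dB : PySem.Dict String (Int × Int)) (hG : pvGood dB) (p : Int × String) :
    pvStepA (PySem.Dict.mk (dB.items.map pvF)) p
      = PySem.Dict.mk ((pvStepB dB (some p)).items.map pvF)
    ∧ pvGood (pvStepB dB (some p)) := by
  obtain ⟨dl⟩ := dB
  cases p with
  | mk hp ps =>
    have hget := pv_get?_map dl ps
    have hcont : (PySem.Dict.mk (dl.map pvF)).contains ps = (PySem.Dict.mk dl).contains ps := by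
      rw [PySem.Dict.contains_eq_isSome_get?, PySem.Dict.contains_eq_isSome_get?, hget]
      cases (PySem.Dict.mk dl).get? ps <;> rfl
    constructor
    · -- dict simulation
      show pvStepA _ (hp, ps) = _
      unfold pvStepA pvStepB
      simp only [hcont]
      by_cases h : (PySem.Dict.mk dl).contains ps = true
      · -- key present: get its counter
        have hsome : ((PySem.Dict.mk dl).get? ps).isSome := by
          rw [← PySem.Dict.contains_eq_isSome_get?]; exact h
        obtain ⟨c, hcv⟩ := Option.isSome_iff_exists.mp hsome
        have hgd : (PySem.Dict.mk dl).getD ps (0, 0) = c :=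
          PySem.Dict.getD_of_get?_eq_some _ (0, 0) hcv
        have hgdC : (PySem.Dict.mk (dl.map pvF)).getD ps 0 = pvClassify c := by
          rw [PySem.Dict.getD_eq_get?_getD, pv_get?_map, hcv]; rfl
        obtain ⟨h1, h2, h3⟩ := hG ps c hcv
        have hcne : ¬(c.1 = 0 ∧ c.2 = 0) := by
          intro hz; exact h3 (Prod.ext hz.1 hz.2)
        rw [if_pos h, hgd, hgdC]
        by_cases hhp : (hp == 1) = true
        · have hcl : pvClassify (c.1 + 1, c.2)
              = if pvClassify c < 0 then pvClassify c - 1 else 0 := by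
            unfold pvClassify
            by_cases hb : c.2 = 0
            · have hc1 : 0 < c.1 := by
                rcases lt_or_eq_of_le h1 with hlt | heq
                · exact hlt
                · exact absurd ⟨heq.symm, hb⟩ hcne
              simp [hb]; omega
            · by_cases ha : c.1 = 0 <;> simp [ha, hb] <;> omega
          rw [if_pos hhp, if_pos hhp, ← pv_insert_map dl ps (c.1 + 1, c.2), hcl]
          by_cases hP : pvClassify c < 0 <;> simp [hP]
        · have hcl : pvClassify (c.1, c.2 + 1)
              = if pvClassify c > 0 then pvClassify c + 1 else 0 := by
            unfold pvClassify
            by_cases hb : c.2 = 0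
            · have hc1 : 0 < c.1 := by
                rcases lt_or_eq_of_le h1 with hlt | heq
                · exact hlt
                · exact absurd ⟨heq.symm, hb⟩ hcne
              simp [hb]; omega
            · by_cases ha : c.1 = 0 <;> simp [ha, hb] <;> omega
          rw [if_neg hhp, if_neg hhp, ← pv_insert_map dl ps (c.1, c.2 + 1), hcl]
          by_cases hP : pvClassify c > 0 <;> simp [hP]
      · -- fresh key
        have hgd : (PySem.Dict.mk dl).getD ps (0, 0) = (0, 0) :=
          PySem.Dict.getD_of_not_contains _ (0, 0) (Bool.of_not_eq_true h)
        rw [if_neg h, hgd]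
        by_cases hhp : (hp == 1) = true
        · rw [if_pos hhp, if_pos hhp]
          exact pv_insert_map dl ps (1, 0)
        · rw [if_neg hhp, if_neg hhp]
          exact pv_insert_map dl ps (0, 1)
    · -- Good preserved
      intro k v hkv
      unfold pvStepB at hkv
      simp only at hkv
      rw [PySem.Dict.get?_insert] at hkv
      by_cases hk : k = ps
      · rw [if_pos hk] at hkv
        have hbound : 0 ≤ ((PySem.Dict.mk dl).getD ps (0, 0)).1
            ∧ 0 ≤ ((PySem.Dict.mk dl).getD ps (0, 0)).2 := by
          cases hc : (PySem.Dict.mk dl).get? ps with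
          | none =>
            rw [PySem.Dict.getD_eq_get?_getD, hc]
            exact ⟨le_refl 0, le_refl 0⟩
          | some c =>
            obtain ⟨h1, h2, _⟩ := hG ps c hc
            rw [PySem.Dict.getD_of_get?_eq_some _ (0, 0) hc]
            exact ⟨h1, h2⟩
        by_cases hhp : (hp == 1) = true
        · rw [if_pos hhp] at hkv
          injection hkv with hv
          subst hv
          refine ⟨by omega, hbound.2, fun hz => ?_⟩
          rw [Prod.ext_iff] at hz
          simp at hz
          omega
        · rw [if_neg hhp] at hkv
          injection hkv with hv
          subst hv
          refine ⟨hbound.1, by omega, fun hz => ?_⟩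
          rw [Prod.ext_iff] at hz
          simp at hz
          omega
      · rw [if_neg hk] at hkv
        exact hG k v hkv

-- the fold invariant, over the whole list
theorem pv_fold (l : List (Option (Int × String))) (dB : PySem.Dict String (Int × Int))
    (hG : pvGood dB) :
    (l.filterMap id).foldl pvStepA (PySem.Dict.mk (dB.items.map pvF))
      = PySem.Dict.mk ((l.foldl pvStepB dB).items.map pvF)
    ∧ pvGood (l.foldl pvStepB dB) := by
  induction l generalizing dB with
  | nil => exact ⟨rfl, hG⟩
  | cons x xs ih =>
    cases x with
    | none => exact ih dB hG
    | some p =>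
      obtain ⟨hstep, hG'⟩ := pv_step dB hG p
      simpa [hstep] using ih (pvStepB dB (some p)) hG'

-- ===== VERDICT (by name: the statement is the Claim_ definition above) =====
theorem categorize_ps_spec : Claim_equal_categorize_ps := by
  intro myvalues _
  show categorize_ps myvalues = categorize_ps_alt myvalues
  unfold categorize_ps categorize_ps_alt
  have hempty : (PySem.Dict.empty : PySem.Dict String Int)
      = PySem.Dict.mk (((PySem.Dict.empty : PySem.Dict String (Int × Int)).items).map pvF) := rfl
  rw [hempty, (pv_fold myvalues PySem.Dict.empty pvGood_empty).1]
  rfl
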